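-- pv_equiv track=rewrite | github.com/TSSG/Iot-Subscriber | src/utils/transform.py | split_topic
-- ===== SOURCE A (Python) =====
-- def split_topic(topic):
--     """Deconstructs MQTT topic to route data inserted to Influx"""
--     tp_delim = {}
--     tp = topic.split("/")
--     ndx = 0
--     for i in tp:
--         if ndx == 0:
--             tp_delim["location"] = i
--         elif ndx == 1:
--             tp_delim["asset"] = i
--         elif ndx == 2:
--             tp_delim["measurement"] = i
--         else:
--             tp_delim["taggable_"+str(ndx)] = i
--         ndx+=1
--     return tp_delim
-- ===== SOURCE B (Python) =====
-- def split_topic(topic):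
--     """Deconstructs MQTT topic to route data inserted to Influx"""
--     fixed = ("location", "asset", "measurement")
--     tp_delim = {}
--     s = topic
--     ndx = 0
--     while True:
--         key = fixed[ndx] if ndx < 3 else "taggable_" + str(ndx)
--         j = s.find("/")
--         if j == -1:
--             tp_delim[key] = s
--             return tp_delim
--         tp_delim[key] = s[:j]
--         s = s[j + 1:]
--         ndx += 1
-- ===== Notes on version B (the rewrite author's own statement) =====
-- stated objective: alternative
-- what changed: B never calls split: it is an incremental streaming parser that repeatedly locates the next '/' with find, slices the segment off the front of the remaining string, and assigns it to its key, instead of A's split-then-dispatch loop over a prebuilt list.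
import Mathlib
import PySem

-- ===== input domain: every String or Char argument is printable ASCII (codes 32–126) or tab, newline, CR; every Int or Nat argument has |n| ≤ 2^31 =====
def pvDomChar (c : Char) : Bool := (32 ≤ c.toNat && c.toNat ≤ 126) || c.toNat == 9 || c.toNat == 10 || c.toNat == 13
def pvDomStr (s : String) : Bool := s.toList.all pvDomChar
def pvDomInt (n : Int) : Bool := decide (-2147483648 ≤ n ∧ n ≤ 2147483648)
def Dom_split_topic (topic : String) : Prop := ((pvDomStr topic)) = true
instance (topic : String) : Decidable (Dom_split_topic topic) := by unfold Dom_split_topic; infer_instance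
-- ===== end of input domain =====

-- B is a streaming parser: it never builds the split list, but repeatedly find()s the next '/',
-- slices the segment off the front and assigns it to its key (alternative decomposition, same cost).

-- ===== PORT A =====
-- one step of A's for-loop: state = (dict so far, ndx)
def splitTopicStepA (st : PySem.Dict String String × Int) (i : String) :
    PySem.Dict String String × Int :=
  (if st.2 == 0 then st.1.insert "location" i
   else if st.2 == 1 then st.1.insert "asset" i
   else if st.2 == 2 then st.1.insert "measurement" i
   else st.1.insert ("taggable_" ++ PySem.Int.toStr st.2) i,
   st.2 + 1)

def split_topic (topic : String) : List (String × String) :=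
  let tp := (PySem.Str.split? topic "/").getD []   -- sep = "/" ≠ "", so split? is always `some`
  (tp.foldl splitTopicStepA (PySem.Dict.empty, 0)).1.items

-- ===== PORT B =====
-- Source B's while-loop: state (s, ndx, dict); the string is carried as its List Char.
-- j = s.find("/"); on j ≠ -1 we have 0 ≤ j < len(s), so Python's s[:j] is take j and
-- s[j+1:] is drop (j+1) — exact there.
def splitTopicGo (s : List Char) (ndx : Int) (d : PySem.Dict String String) :
    PySem.Dict String String :=
  -- fixed[ndx] for 0 ≤ ndx < 3; the default "" of pyGetD is never used
  let key := if ndx < 3 then PySem.List.pyGetD ["location", "asset", "measurement"] ndx ""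
             else "taggable_" ++ PySem.Int.toStr ndx
  let j := PySem.Chars.find s ['/']
  if h : j = -1 then d.insert key (String.ofList s)
  else
    splitTopicGo (s.drop (j.toNat + 1)) (ndx + 1) (d.insert key (String.ofList (s.take j.toNat)))
termination_by s.length
decreasing_by
  have h' : ¬ PySem.Chars.find s ['/'] = -1 := h
  have hj : 0 ≤ PySem.Chars.find s ['/'] := by
    have := PySem.Chars.neg_one_le_find s ['/']
    omega
  have hin : (['/'] : List Char) <:+: s := (PySem.Chars.find_nonneg_iff s ['/']).mp hj
  have hne : s ≠ [] := by rintro rfl; simp at hin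
  have h0 : 0 < s.length := List.length_pos_of_ne_nil hne
  have hd := List.length_drop (l := s) (i := (PySem.Chars.find s ['/']).toNat + 1)
  omega

def split_topic_alt (topic : String) : List (String × String) :=
  (splitTopicGo topic.toList 0 PySem.Dict.empty).items

-- ===== PRECONDITION & SPEC =====
def Spec_split_topic (topic : String) (out : List (String × String)) : Prop := out = split_topic_alt topic
instance (topic : String) (out : List (String × String)) : Decidable (Spec_split_topic topic out) := by unfold Spec_split_topic; infer_instance

-- ===== CLAIM (what is proved, stated in full; the proofs are below) =====
def Claim_equal_split_topic : Prop := ∀ (topic : String), Dom_split_topic topic → Spec_split_topic topic (split_topic topic)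

-- ===== LEMMAS AND PROOFS =====

-- structural characterisation of splitOn · ['/']: (first field, remaining fields)
def mySplit : List Char → List Char × List (List Char)
  | [] => ([], [])
  | c :: rest =>
      let p := mySplit rest
      if c = '/' then ([], p.1 :: p.2) else (c :: p.1, p.2)

theorem splitOn_go_spec : ∀ (fuel : Nat) (s cur : List Char) (acc : List (List Char)),
    s.length < fuel →
    PySem.Chars.splitOn.go ['/'] fuel s cur acc =
      acc.reverse ++ (cur.reverse ++ (mySplit s).1) :: (mySplit s).2 := by
  intro fuel
  induction fuel with
  | zero => intro s cur acc h; omega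
  | succ f ih =>
    intro s cur acc h
    cases s with
    | nil => simp [PySem.Chars.splitOn.go, mySplit]
    | cons c rest =>
      by_cases hc : c = '/'
      · subst hc
        have hpre : List.isPrefixOf ['/'] ('/' :: rest) = true := by
          simp [List.isPrefixOf]
        simp only [PySem.Chars.splitOn.go, hpre, if_pos]
        have hdrop : List.drop (['/'] : List Char).length ('/' :: rest) = rest := rfl
        rw [hdrop, ih rest [] (cur.reverse :: acc) (by simp at h ⊢; omega)]
        simp [mySplit]
      · have hpre : List.isPrefixOf ['/'] (c :: rest) = false := by
          simp [List.isPrefixOf]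
          exact fun e => hc e.symm
        simp only [PySem.Chars.splitOn.go, hpre, Bool.false_eq_true, if_false]
        rw [ih rest (c :: cur) acc (by simp at h ⊢; omega)]
        simp [mySplit, hc]

theorem splitOn_eq_mySplit (s : List Char) :
    PySem.Chars.splitOn s ['/'] = (mySplit s).1 :: (mySplit s).2 := by
  unfold PySem.Chars.splitOn
  rw [splitOn_go_spec (s.length + 1) s [] [] (by omega)]
  simp

theorem mySplit_no_slash (s : List Char) (h : '/' ∉ s) : mySplit s = (s, []) := by
  induction s with
  | nil => rfl
  | cons c rest ih =>
    have hc : ¬ c = '/' := fun e => h (e ▸ List.mem_cons_self ..)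
    have := ih (fun m => h (List.mem_cons_of_mem _ m))
    simp [mySplit, hc, this]

theorem mySplit_append (a b : List Char) (h : '/' ∉ a) :
    mySplit (a ++ '/' :: b) = (a, (mySplit b).1 :: (mySplit b).2) := by
  induction a with
  | nil => simp [mySplit]
  | cons c rest ih =>
    have hc : ¬ c = '/' := fun e => h (e ▸ List.mem_cons_self ..)
    have := ih (fun m => h (List.mem_cons_of_mem _ m))
    simp [mySplit, hc, this]

-- singleton prefix
theorem singleton_prefix_iff (c : Char) (l : List Char) :
    [c] <+: l ↔ l.head? = some c := by
  cases l with
  | nil => simp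
  | cons x t =>
    constructor
    · rintro ⟨u, hu⟩
      simp at hu ⊢
      exact hu.1.symm
    · intro hx
      simp at hx
      exact ⟨t, by simp [hx]⟩

-- find = -1 on sep "/": splitOn gives [s]
theorem splitOn_of_find_neg (s : List Char) (h : PySem.Chars.find s ['/'] = -1) :
    PySem.Chars.splitOn s ['/'] = [s] := by
  have hnin : '/' ∉ s := by
    have := (PySem.Chars.find_eq_neg_one_iff s ['/']).mp h
    intro hm
    exact this ((List.singleton_infix_iff '/' s).mpr hm)
  rw [splitOn_eq_mySplit, mySplit_no_slash s hnin]

theorem splitOn_of_find_pos (s : List Char) (h : PySem.Chars.find s ['/'] ≠ -1) :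
    (PySem.Chars.find s ['/']).toNat < s.length ∧
    PySem.Chars.splitOn s ['/'] =
      s.take (PySem.Chars.find s ['/']).toNat ::
        PySem.Chars.splitOn (s.drop ((PySem.Chars.find s ['/']).toNat + 1)) ['/'] := by
  have h0 : 0 ≤ PySem.Chars.find s ['/'] := by
    have := PySem.Chars.neg_one_le_find s ['/']
    omega
  obtain ⟨hpre, hmin⟩ := PySem.Chars.find_spec (s := s) (sub := ['/']) h0
  set j := (PySem.Chars.find s ['/']).toNat with hj
  have hhead : (s.drop j).head? = some '/' := (singleton_prefix_iff _ _).mp hpre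
  have hjlt : j < s.length := by
    by_contra hge
    rw [List.drop_eq_nil_of_le (by omega)] at hhead
    simp at hhead
  refine ⟨hjlt, ?_⟩
  have hnin : '/' ∉ s.take j := by
    intro hm
    obtain ⟨i, hi, hgi⟩ := List.getElem_of_mem hm
    have hil : i < j := by simpa using (lt_of_lt_of_le hi (by simp))
    have hgi' : s[i]'(by omega) = '/' := by
      rw [← hgi]; simp [List.getElem_take]
    apply hmin i hil
    rw [singleton_prefix_iff, List.head?_drop, List.getElem?_eq_getElem (by omega)]
    simp [hgi']
  have hsplit : s = s.take j ++ '/' :: s.drop (j + 1) := by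
    conv_lhs => rw [← List.take_append_drop j s]
    congr 1
    rw [(List.drop_eq_getElem_cons hjlt)]
    congr 1
    have : s[j]'hjlt = '/' := by
      rw [List.head?_drop] at hhead
      simpa [hjlt] using hhead
    exact this
  rw [splitOn_eq_mySplit, splitOn_eq_mySplit]
  conv_lhs => rw [hsplit]
  rw [mySplit_append _ _ hnin]

-- B's key at counter n equals A's branch-chain key, for 0 ≤ n
theorem keyB_eq_keyA (n : Int) (hn : 0 ≤ n) :
    (if n < 3 then PySem.List.pyGetD ["location", "asset", "measurement"] n ""
     else "taggable_" ++ PySem.Int.toStr n) =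
    (if n == 0 then "location" else if n == 1 then "asset"
     else if n == 2 then "measurement" else "taggable_" ++ PySem.Int.toStr n) := by
  by_cases h0 : n = 0
  · subst h0; decide
  · by_cases h1 : n = 1
    · subst h1; decide
    · by_cases h2 : n = 2
      · subst h2; decide
      · have : ¬ n < 3 := by omega
        simp [this, h0, h1, h2]

-- A's branch-chain insert, rewritten as a single insert with B's key
theorem insert_key_if (d : PySem.Dict String String) (v : String) (n : Int) (hn : 0 ≤ n) :
    (if n == 0 then d.insert "location" v else if n == 1 then d.insert "asset" v
     else if n == 2 then d.insert "measurement" v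
     else d.insert ("taggable_" ++ PySem.Int.toStr n) v) =
    d.insert (if n < 3 then PySem.List.pyGetD ["location", "asset", "measurement"] n ""
              else "taggable_" ++ PySem.Int.toStr n) v := by
  rw [keyB_eq_keyA n hn]
  split_ifs <;> rfl

-- B's streaming recursion computes A's fold over the split list
theorem Bgo_eq : ∀ (k : Nat) (s : List Char), s.length ≤ k → ∀ (n : Int), 0 ≤ n →
    ∀ (d : PySem.Dict String String),
    splitTopicGo s n d =
      (((PySem.Chars.splitOn s ['/']).map String.ofList).foldl splitTopicStepA (d, n)).1 := by
  intro k
  induction k with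
  | zero =>
    intro s hs n hn d
    have hnil : s = [] := List.eq_nil_of_length_eq_zero (by omega)
    subst hnil
    rw [splitTopicGo]
    have hf : PySem.Chars.find ([] : List Char) ['/'] = -1 := by decide
    rw [splitOn_of_find_neg _ hf]
    simp only [hf, dif_pos]
    simp only [List.map_cons, List.map_nil, List.foldl_cons, List.foldl_nil, splitTopicStepA]
    exact (insert_key_if d _ n hn).symm
  | succ m ih =>
    intro s hs n hn d
    rw [splitTopicGo]
    by_cases hf : PySem.Chars.find s ['/'] = -1
    · rw [splitOn_of_find_neg _ hf]
      simp only [hf, dif_pos]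
      simp only [List.map_cons, List.map_nil, List.foldl_cons, List.foldl_nil, splitTopicStepA]
      exact (insert_key_if d _ n hn).symm
    · obtain ⟨hlt, hsp⟩ := splitOn_of_find_pos s hf
      rw [hsp]
      simp only [hf, dif_neg, not_false_iff]
      rw [ih _ (by simp; omega) (n + 1) (by omega)]
      simp only [List.map_cons, List.foldl_cons, splitTopicStepA]
      rw [insert_key_if d _ n hn]

theorem split?_slash (topic : String) :
    (PySem.Str.split? topic "/").getD [] =
      (PySem.Chars.splitOn topic.toList ['/']).map String.ofList := by
  simp [PySem.Str.split?, PySem.Chars.split?]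

-- ===== VERDICT (by name: the statement is the Claim_ definition above) =====
theorem split_topic_spec : Claim_equal_split_topic := by
  intro topic _
  unfold Spec_split_topic split_topic split_topic_alt
  rw [split?_slash]
  rw [Bgo_eq topic.toList.length topic.toList le_rfl 0 le_rfl PySem.Dict.empty]
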